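-- pv_equiv track=rewrite | github.com/nishi10mo/AtCoder | practice/AtCoder Beginner Contest/ABC299/A.py | f
-- ===== SOURCE A (Python) =====
-- def f(N, S):
--     flag = False
--     for s in S:
--         if s == "|":
--             if flag == False:
--                 flag = True
--             else:
--                 flag = False
--         if s == "*":
--             if flag == True:
--                 return "in"
--             else:
--                 return "out"
-- ===== SOURCE B (Python) =====
-- def f(N, S):
--     if "*" not in S:
--         return None
--     idx = S.index("*")
--     return "in" if S[:idx].count("|") % 2 == 1 else "out"
-- ===== Notes on version B (the rewrite author's own statement) =====
-- stated objective: simpler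
-- what changed: Replaces the stateful flag-toggle scan with a locate-then-count decomposition: find the star's index and return "in" iff the number of bars before it is odd.
-- outside the precondition, e.g. on f(3, 'abc'): A returns None, B returns None
import Mathlib
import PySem

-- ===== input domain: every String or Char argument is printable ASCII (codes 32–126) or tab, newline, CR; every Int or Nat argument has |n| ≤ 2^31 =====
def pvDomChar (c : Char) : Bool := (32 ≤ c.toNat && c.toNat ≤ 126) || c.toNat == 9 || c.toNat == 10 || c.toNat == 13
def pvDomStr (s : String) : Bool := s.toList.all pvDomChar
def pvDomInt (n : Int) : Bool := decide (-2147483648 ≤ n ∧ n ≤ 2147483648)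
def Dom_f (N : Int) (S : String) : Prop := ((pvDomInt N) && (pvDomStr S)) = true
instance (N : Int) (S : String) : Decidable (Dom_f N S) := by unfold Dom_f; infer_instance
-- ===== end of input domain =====

-- B replaces A's stateful flag-toggle scan by locating the star and testing the parity of bars before it;
-- Pre_f excludes strings without '*', where A falls off the loop and returns None (not a string).


-- ===== PORT A =====
-- loop over the characters carrying the flag; returns none when the loop falls through (Python returns None)
def fLoop : List Char → Bool → Option String
  | [], _ => none
  | c :: rest, flag =>
    let flag' := if c = '|' then (if flag = false then true else false) else flag
    if c = '*' then some (if flag' = true then "in" else "out")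
    else fLoop rest flag'

def f (N : Int) (S : String) : String := (fLoop S.toList false).getD ""

-- ===== PORT B =====
def f_alt (N : Int) (S : String) : String :=
  if S.toList.contains '*' then
    (if (S.toList.take (S.toList.idxOf '*')).count '|' % 2 == 1 then "in" else "out")
  else ""

-- ===== PRECONDITION & SPEC =====
-- Pre_f excludes strings without '*': there A returns None, which is not a string value.
def Pre_f (N : Int) (S : String) : Prop := '*' ∈ S.toList
instance (N : Int) (S : String) : Decidable (Pre_f N S) := by unfold Pre_f; infer_instance
def pvWitness_f : Int × String := (3, "|*|")

def Spec_f (N : Int) (S : String) (out : String) : Prop := out = f_alt N S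
instance (N : Int) (S : String) (out : String) : Decidable (Spec_f N S out) := by unfold Spec_f; infer_instance

-- ===== CLAIM (what is proved, stated in full; the proofs are below) =====
def Claim_equal_f : Prop := ∀ (N : Int) (S : String), Dom_f N S → Pre_f N S → Spec_f N S (f N S)

-- ===== LEMMAS AND PROOFS =====

-- one extra bar flips the parity test
theorem bool_parity (flag : Bool) (k : Nat) :
    (!flag ^^ (k % 2 == 1)) = (flag ^^ ((k + 1) % 2 == 1)) := by
  rcases Nat.mod_two_eq_zero_or_one k with h0 | h0 <;> cases flag <;>
    simp [Nat.add_mod, h0]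

-- the flag loop yields the parity of '|' before the first '*', XORed with the initial flag
theorem fLoop_mem (l : List Char) : ∀ (flag : Bool), '*' ∈ l →
    fLoop l flag =
      some (if (flag ^^ ((l.takeWhile (· ≠ '*')).count '|' % 2 == 1)) then "in" else "out") := by
  induction l with
  | nil => intro flag h; simp at h
  | cons c rest ih =>
    intro flag h
    by_cases hc : c = '*'
    · subst hc
      cases flag <;> simp [fLoop, List.takeWhile]
    · have hmem : '*' ∈ rest := by
        rcases List.mem_cons.mp h with h1 | h1
        · exact absurd h1.symm hc
        · exact h1
      by_cases hb : c = '|'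
      · subst hb
        rw [show fLoop ('|' :: rest) flag = fLoop rest (!flag) from by
              cases flag <;> simp [fLoop],
            ih (!flag) hmem]
        have hcnt : (('|' :: rest).takeWhile (· ≠ '*')).count '|'
            = (rest.takeWhile (· ≠ '*')).count '|' + 1 := by
          simp [List.takeWhile]
        rw [hcnt, ← bool_parity]
      · rw [show fLoop (c :: rest) flag = fLoop rest flag from by
              simp [fLoop, hb, hc],
            ih flag hmem]
        have hcnt : ((c :: rest).takeWhile (· ≠ '*')).count '|'
            = (rest.takeWhile (· ≠ '*')).count '|' := by
          simp [List.takeWhile, hc, hb]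
        rw [hcnt]

-- take up to the first occurrence = takeWhile (· ≠ a)
theorem take_idxOf_eq_takeWhile (a : Char) (l : List Char) (h : a ∈ l) :
    l.take (l.idxOf a) = l.takeWhile (· ≠ a) := by
  induction l with
  | nil => simp at h
  | cons c rest ih =>
    by_cases hc : c = a
    · subst hc; simp [List.takeWhile]
    · have hmem : a ∈ rest := by
        rcases List.mem_cons.mp h with h1 | h1
        · exact absurd h1.symm hc
        · exact h1
      simp [hc, List.takeWhile, ih hmem]

-- ===== VERDICT (by name: the statement is the Claim_ definition above) =====
theorem f_spec : Claim_equal_f := by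
  intro N S _ hpre
  unfold Spec_f f f_alt
  have hmem : '*' ∈ S.toList := hpre
  rw [fLoop_mem S.toList false hmem,
      take_idxOf_eq_takeWhile '*' S.toList hmem]
  simp [hmem, Option.getD]
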